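-- pv_equiv track=rewrite | github.com/maheshgitte77/lipsync-fraud-api | app/services/fraud/proctor_service.py | _count_repetitive_center_oscillation
-- ===== SOURCE A (Python) =====
-- def _count_repetitive_center_oscillation(seq: list[str], direction: str) -> int:
--     if len(seq) < 4:
--         return 0
--     compressed: list[str] = []
--     for d in seq:
--         if not compressed or compressed[-1] != d:
--             compressed.append(d)
--     count = 0
--     i = 0
--     while i <= len(compressed) - 4:
--         if (
--             compressed[i] == direction
--             and compressed[i + 1] == "CENTER"
--             and compressed[i + 2] == direction
--             and compressed[i + 3] == "CENTER"
--         ):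
--             count += 1
--             i += 4
--         else:
--             i += 1
--     return count
-- ===== SOURCE B (Python) =====
-- def _count_repetitive_center_oscillation(seq: list[str], direction: str) -> int:
--     compressed = seq[:1] + [b for a, b in zip(seq, seq[1:]) if a != b]
--     symbols = "".join(
--         "D" if d == direction else "C" if d == "CENTER" else "O" for d in compressed
--     )
--     return symbols.count("DCDC")
-- ===== Notes on version B (the rewrite author's own statement) =====
-- stated objective: idiomatic
-- what changed: Replaces the explicit append-compression loop and the index-based sliding-window while-loop by a zip-based duplicate compression, a map to a one-character-per-element symbolic string, and the built-in non-overlapping str.count("DCDC").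
import Mathlib
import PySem

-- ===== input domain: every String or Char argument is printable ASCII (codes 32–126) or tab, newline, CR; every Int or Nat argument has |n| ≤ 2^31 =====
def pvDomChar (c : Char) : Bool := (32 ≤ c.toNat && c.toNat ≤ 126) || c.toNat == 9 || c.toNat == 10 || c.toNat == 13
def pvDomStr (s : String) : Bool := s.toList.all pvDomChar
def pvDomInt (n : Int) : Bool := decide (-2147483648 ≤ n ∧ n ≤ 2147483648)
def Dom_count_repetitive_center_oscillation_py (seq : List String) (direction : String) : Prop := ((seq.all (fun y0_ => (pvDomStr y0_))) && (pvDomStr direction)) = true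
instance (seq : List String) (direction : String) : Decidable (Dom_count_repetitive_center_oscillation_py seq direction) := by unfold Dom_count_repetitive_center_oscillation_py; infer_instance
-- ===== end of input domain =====

-- B replaces A's append-compression loop and index-based sliding-window scan by a zip-based
-- duplicate compression, a one-character-per-element symbolic string, and the built-in
-- non-overlapping substring count (idiomatic, same asymptotic cost).


-- ===== PORT A =====
-- A's while loop over index i (i += 4 on a match, i += 1 otherwise, stop when fewer than 4
-- elements remain) as structural recursion on the remaining suffix, carrying `count`.
def pvALoop (direction : String) : List String → Int → Int
  | a :: b :: c :: d :: rest, count =>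
      if a = direction ∧ b = "CENTER" ∧ c = direction ∧ d = "CENTER" then
        pvALoop direction rest (count + 1)
      else
        pvALoop direction (b :: c :: d :: rest) count
  | _, count => count

def count_repetitive_center_oscillation_py (seq : List String) (direction : String) : Int :=
  if seq.length < 4 then 0
  else
    let compressed := seq.foldl
      (fun comp d => if comp.isEmpty || comp.getLast? != some d then comp ++ [d] else comp) []
    pvALoop direction compressed 0

-- ===== PORT B =====
-- seq[:1] = take 1; "".join of one-character strings = the string of the mapped characters;
-- symbols.count("DCDC") = PySem.Str.count (Python's non-overlapping substring count).
def count_repetitive_center_oscillation_py_alt (seq : List String) (direction : String) : Int :=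
  let compressed := seq.take 1 ++ (((seq.zip (seq.drop 1)).filter (fun p => p.1 != p.2)).map Prod.snd)
  let symbols := String.ofList (compressed.map
    (fun d => if d = direction then 'D' else if d = "CENTER" then 'C' else 'O'))
  ((PySem.Str.count symbols "DCDC" : Nat) : Int)

-- ===== PRECONDITION & SPEC =====
def Spec_count_repetitive_center_oscillation_py (seq : List String) (direction : String) (out : Int) : Prop := out = count_repetitive_center_oscillation_py_alt seq direction
instance (seq : List String) (direction : String) (out : Int) : Decidable (Spec_count_repetitive_center_oscillation_py seq direction out) := by unfold Spec_count_repetitive_center_oscillation_py; infer_instance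

-- ===== CLAIM (what is proved, stated in full; the proofs are below) =====
def Claim_equal_count_repetitive_center_oscillation_py : Prop := ∀ (seq : List String) (direction : String), Dom_count_repetitive_center_oscillation_py seq direction → Spec_count_repetitive_center_oscillation_py seq direction (count_repetitive_center_oscillation_py seq direction)

-- ===== LEMMAS AND PROOFS =====

-- the per-element symbol map of B
def pvM (direction d : String) : Char := if d = direction then 'D' else if d = "CENTER" then 'C' else 'O'

-- duplicate compression relative to a previous element
def pvDed (p : String) : List String → List String
  | [] => []
  | b :: t => if p = b then pvDed p t else b :: pvDed b t

lemma pv_ded_chain : ∀ (xs : List String) (p : String), List.IsChain (· ≠ ·) (p :: pvDed p xs) := by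
  intro xs
  induction xs with
  | nil => intro p; simp [pvDed]
  | cons x t ih =>
    intro p
    by_cases h : p = x
    · simpa [pvDed, h] using ih x
    · simp only [pvDed, if_neg h]
      exact List.isChain_cons_cons.mpr ⟨h, ih x⟩

lemma pv_ded_len : ∀ (xs : List String) (p : String), (pvDed p xs).length ≤ xs.length := by
  intro xs
  induction xs with
  | nil => intro p; simp [pvDed]
  | cons x t ih =>
    intro p
    by_cases h : p = x
    · simp [pvDed, h]; exact Nat.le_succ_of_le (ih x)
    · simp [pvDed, h]; exact ih x

lemma pv_ded_zip : ∀ (xs : List String) (p : String),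
    pvDed p xs = (((p :: xs).zip xs).filter (fun q => q.1 != q.2)).map Prod.snd := by
  intro xs
  induction xs with
  | nil => intro p; simp [pvDed]
  | cons x t ih =>
    intro p
    by_cases h : p = x
    · simp [pvDed, h, ih x]
    · simp [pvDed, h, ih x]

lemma pv_fold (xs : List String) : ∀ (l : List String) (p : String),
    List.foldl (fun comp d => if comp.isEmpty || comp.getLast? != some d then comp ++ [d] else comp)
      (l ++ [p]) xs = (l ++ [p]) ++ pvDed p xs := by
  induction xs with
  | nil => intro l p; simp [pvDed]
  | cons x t ih =>
    intro l p
    by_cases h : p = x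
    · rw [List.foldl_cons, if_neg (by simp [h])]
      rw [ih l p]
      simp [pvDed, h]
    · have hc : ((l ++ [p]).isEmpty || (l ++ [p]).getLast? != some x) = true := by
        simp [h]
      rw [List.foldl_cons, if_pos hc]
      have := ih (l ++ [p]) x
      simp only [List.append_assoc] at this ⊢
      rw [this]
      simp [pvDed, h]

lemma pv_go_acc : ∀ (fuel : Nat) (l : List Char) (acc : Nat),
    PySem.Chars.count.go ['D','C','D','C'] fuel l acc
      = acc + PySem.Chars.count.go ['D','C','D','C'] fuel l 0 := by
  intro fuel
  induction fuel with
  | zero => intro l acc; cases l <;> simp [PySem.Chars.count.go]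
  | succ n ih =>
    intro l acc
    cases l with
    | nil => simp [PySem.Chars.count.go]
    | cons x t =>
      by_cases h : (['D','C','D','C'].isPrefixOf (x :: t)) = true
      · simp only [PySem.Chars.count.go, h, if_true]
        rw [ih _ (acc + 1), ih _ 1]; omega
      · simp only [PySem.Chars.count.go, h]
        exact ih t acc

lemma pv_go_short : ∀ (fuel : Nat) (l : List Char) (acc : Nat), l.length < 4 →
    PySem.Chars.count.go ['D','C','D','C'] fuel l acc = acc := by
  intro fuel
  induction fuel with
  | zero => intro l acc _; cases l <;> simp [PySem.Chars.count.go]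
  | succ n ih =>
    intro l acc h
    cases l with
    | nil => simp [PySem.Chars.count.go]
    | cons x t =>
      have hp : (['D','C','D','C'].isPrefixOf (x :: t)) = false := by
        rw [Bool.eq_false_iff]
        intro hc
        have := (List.isPrefixOf_iff_prefix.mp hc).length_le
        simp at this
        simp at h
        omega
      simp only [PySem.Chars.count.go, hp]
      exact ih t acc (by simp at h ⊢; omega)

lemma pv_mD (direction d : String) : pvM direction d = 'D' ↔ d = direction := by
  unfold pvM
  by_cases h1 : d = direction
  · simp [h1]
  · by_cases h2 : d = "CENTER" <;> simp [h1, h2]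

lemma pv_mC (direction d : String) : pvM direction d = 'C' ↔ (¬ d = direction ∧ d = "CENTER") := by
  unfold pvM
  by_cases h1 : d = direction
  · simp [h1]
  · by_cases h2 : d = "CENTER" <;> simp [h1, h2]

lemma pv_main (direction : String) : ∀ (fuel : Nat) (cs : List String) (cnt : Int),
    cs.length ≤ fuel → List.IsChain (· ≠ ·) cs →
    pvALoop direction cs cnt
      = cnt + (PySem.Chars.count.go ['D','C','D','C'] fuel (cs.map (pvM direction)) 0 : Int) := by
  intro fuel
  induction fuel with
  | zero =>
    intro cs cnt h _
    have : cs = [] := List.length_eq_zero_iff.mp (Nat.le_zero.mp h)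
    subst this
    simp [pvALoop, PySem.Chars.count.go]
  | succ n ih =>
    intro cs cnt hlen hch
    match cs with
    | [] => simp [pvALoop, PySem.Chars.count.go]
    | [a] | [a,b] | [a,b,c] =>
      rw [pv_go_short _ _ _ (by simp)]
      simp [pvALoop]
    | a :: b :: c :: d :: rest =>
      simp only [List.isChain_cons_cons] at hch
      obtain ⟨hab, hbc, hcd, hrest⟩ := hch
      by_cases hA : a = direction ∧ b = "CENTER" ∧ c = direction ∧ d = "CENTER"
      · obtain ⟨h1, h2, h3, h4⟩ := hA
        have hp : (['D','C','D','C'].isPrefixOf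
            ((a :: b :: c :: d :: rest).map (pvM direction))) = true := by
          have hb : ¬ b = direction := fun h => hab (by rw [h1, h])
          have hd : ¬ d = direction := fun h => hcd (by rw [h3, h])
          simp [List.isPrefixOf,
            (pv_mD direction a).mpr h1, (pv_mC direction b).mpr ⟨hb, h2⟩,
            (pv_mD direction c).mpr h3, (pv_mC direction d).mpr ⟨hd, h4⟩]
        simp only [pvALoop]
        rw [if_pos ⟨h1, h2, h3, h4⟩]
        simp only [List.map_cons]
        simp only [List.map_cons] at hp
        simp only [PySem.Chars.count.go, hp, if_true]
        have hlen' : rest.length ≤ n := by simp at hlen; omega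
        have hch' : List.IsChain (· ≠ ·) rest := hrest.tail
        rw [ih rest (cnt + 1) hlen' hch']
        have : List.drop (['D','C','D','C'] : List Char).length
            (pvM direction a :: pvM direction b :: pvM direction c :: pvM direction d :: rest.map (pvM direction))
            = rest.map (pvM direction) := by simp
        rw [this, pv_go_acc n (List.map (pvM direction) rest) 1]
        push_cast
        ring
      · have hp : (['D','C','D','C'].isPrefixOf
            ((a :: b :: c :: d :: rest).map (pvM direction))) = false := by
          rw [Bool.eq_false_iff]
          intro hc
          simp [List.isPrefixOf, List.map_cons] at hc
          obtain ⟨e1, e2, e3, e4⟩ := hc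
          exact hA ⟨(pv_mD direction a).mp e1.symm, ((pv_mC direction b).mp e2.symm).2,
            (pv_mD direction c).mp e3.symm, ((pv_mC direction d).mp e4.symm).2⟩
        simp only [pvALoop]
        rw [if_neg hA]
        simp only [List.map_cons]
        simp only [List.map_cons] at hp
        simp only [PySem.Chars.count.go, hp]
        have hlen' : (b :: c :: d :: rest).length ≤ n := by simp at hlen ⊢; omega
        have hch' : List.IsChain (· ≠ ·) (b :: c :: d :: rest) := by
          simp only [List.isChain_cons_cons]; exact ⟨hbc, hcd, hrest⟩
        simpa using ih (b :: c :: d :: rest) cnt hlen' hch'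

-- ===== VERDICT (by name: the statement is the Claim_ definition above) =====
theorem count_repetitive_center_oscillation_py_spec : Claim_equal_count_repetitive_center_oscillation_py := by
  unfold Claim_equal_count_repetitive_center_oscillation_py
  intro seq direction _
  unfold Spec_count_repetitive_center_oscillation_py
  unfold count_repetitive_center_oscillation_py count_repetitive_center_oscillation_py_alt
  cases seq with
  | nil => simp [PySem.Str.count, PySem.Chars.count, PySem.Chars.count.go]
  | cons s0 rest =>
    have hm : (fun d => if d = direction then 'D' else if d = "CENTER" then 'C' else 'O')
        = pvM direction := rfl
    have hB : (s0 :: rest).take 1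
        ++ ((((s0 :: rest).zip ((s0 :: rest).drop 1)).filter (fun p => p.1 != p.2)).map Prod.snd)
        = s0 :: pvDed s0 rest := by
      simp [pv_ded_zip rest s0]
    have hA : (s0 :: rest).foldl
        (fun comp d => if comp.isEmpty || comp.getLast? != some d then comp ++ [d] else comp) []
        = s0 :: pvDed s0 rest := by
      rw [List.foldl_cons]
      simp only [List.isEmpty_nil, Bool.true_or, if_true]
      simpa using pv_fold rest [] s0
    simp only [hm, hB, hA]
    rw [show PySem.Str.count
        (String.ofList ((s0 :: pvDed s0 rest).map (pvM direction))) "DCDC"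
        = PySem.Chars.count ((s0 :: pvDed s0 rest).map (pvM direction)) ['D','C','D','C'] by
      simp [PySem.Str.count]]
    rw [show PySem.Chars.count ((s0 :: pvDed s0 rest).map (pvM direction)) ['D','C','D','C']
        = PySem.Chars.count.go ['D','C','D','C']
            ((s0 :: pvDed s0 rest).map (pvM direction)).length
            ((s0 :: pvDed s0 rest).map (pvM direction)) 0 by
      simp [PySem.Chars.count]]
    by_cases hlen : (s0 :: rest).length < 4
    · rw [if_pos hlen]
      rw [pv_go_short]
      · simp
      · have := pv_ded_len rest s0
        simp at hlen ⊢
        omega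
    · rw [if_neg hlen]
      have := pv_main direction ((s0 :: pvDed s0 rest).map (pvM direction)).length
        (s0 :: pvDed s0 rest) 0 (by simp) (pv_ded_chain rest s0)
      simpa using this
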